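-- pv_equiv track=rewrite | github.com/lkabuci/File-System-Analyzer | analyzer/large_files_identification.py | convert_threshold
-- ===== SOURCE A (Python) =====
-- from typing import List, Optional
--
-- def convert_threshold(
--     size_threshold: Optional[int], size_unit: str
-- ) -> Optional[int]:
--     """
--     Convert the size threshold to the target unit.
--
--     Parameters:
--     - size_threshold (Optional[int]): Threshold for identifying large files, in bytes.
--     - size_unit (str): Target unit for conversion.
--
--     Returns:
--     Optional[int]: Converted size threshold.
--     """
--     if size_threshold is None:
--         return None
--
--     units = {"bytes": 0, "KB": 1, "MB": 2, "GB": 3}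
--     current_unit = units[size_unit]
--     converted_threshold = size_threshold
--
--     for _ in range(units["bytes"], current_unit):
--         converted_threshold *= 1024
--
--     return converted_threshold
-- ===== SOURCE B (Python) =====
-- def convert_threshold(size_threshold, size_unit):
--     if size_threshold is None:
--         return None
--     # position in the ordered unit scale = exponent; ValueError on unknown unit
--     exp = ["bytes", "KB", "MB", "GB"].index(size_unit)
--     return size_threshold << (10 * exp)
-- ===== Notes on version B (the rewrite author's own statement) =====
-- stated objective: alternative
-- what changed: Replaces the dict lookup plus multiply-in-a-loop with a positional lookup in an ordered unit list and a single bit shift by 10*exponent (1024^k = 2^(10k)); unknown units raise ValueError instead of KeyError, excluded by Pre_.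
import Mathlib
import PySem

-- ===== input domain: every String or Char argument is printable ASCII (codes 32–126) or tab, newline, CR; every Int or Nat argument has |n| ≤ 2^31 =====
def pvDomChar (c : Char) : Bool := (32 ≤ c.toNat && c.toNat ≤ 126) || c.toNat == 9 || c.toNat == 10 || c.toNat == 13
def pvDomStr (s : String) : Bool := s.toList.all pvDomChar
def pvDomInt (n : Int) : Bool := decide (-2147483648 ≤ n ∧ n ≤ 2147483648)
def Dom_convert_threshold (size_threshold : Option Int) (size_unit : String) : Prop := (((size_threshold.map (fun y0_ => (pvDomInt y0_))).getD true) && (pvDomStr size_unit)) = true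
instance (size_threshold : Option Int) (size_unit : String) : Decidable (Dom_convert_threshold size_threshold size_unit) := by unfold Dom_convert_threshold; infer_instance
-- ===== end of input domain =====

-- B replaces the dict lookup + multiply-loop with the unit's position in an ordered list and one bit shift (alternative decomposition, same results).

-- ===== PORT A =====
-- the units dict literal of A (insertion order)
def cvUnits : PySem.Dict String Int :=
  (((PySem.Dict.empty.insert "bytes" 0).insert "KB" 1).insert "MB" 2).insert "GB" 3

def convert_threshold (size_threshold : Option Int) (size_unit : String) : Option Int :=
  match size_threshold with
  | none => none
  | some st =>
    match cvUnits.get? size_unit with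
    | none => none  -- Python raises KeyError here; excluded by Pre_
    | some current_unit =>
      some ((PySem.List.pyRange (cvUnits.getD "bytes" 0) current_unit 1).foldl
              (fun acc _ => acc * 1024) st)

-- ===== PORT B =====
def convert_threshold_alt (size_threshold : Option Int) (size_unit : String) : Option Int :=
  match size_threshold with
  | none => none
  | some st =>
    match PySem.List.index? ["bytes", "KB", "MB", "GB"] size_unit with
    | none => none  -- Python raises ValueError here; excluded by Pre_
    | some exp => some (st * 2 ^ (10 * exp))

-- ===== PRECONDITION & SPEC =====
-- Pre_ excludes only inputs where both Pythons raise on the unknown unit (A a KeyError, B a ValueError).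
def Pre_convert_threshold (size_threshold : Option Int) (size_unit : String) : Prop :=
  size_threshold = none ∨ size_unit = "bytes" ∨ size_unit = "KB" ∨ size_unit = "MB" ∨ size_unit = "GB"
instance (size_threshold : Option Int) (size_unit : String) : Decidable (Pre_convert_threshold size_threshold size_unit) := by unfold Pre_convert_threshold; infer_instance
def pvWitness_convert_threshold : Option Int × String := (some 7, "MB")
def Spec_convert_threshold (size_threshold : Option Int) (size_unit : String) (out : Option Int) : Prop := out = convert_threshold_alt size_threshold size_unit
instance (size_threshold : Option Int) (size_unit : String) (out : Option Int) : Decidable (Spec_convert_threshold size_threshold size_unit out) := by unfold Spec_convert_threshold; infer_instance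

-- ===== CLAIM (what is proved, stated in full; the proofs are below) =====
def Claim_equal_convert_threshold : Prop := ∀ (size_threshold : Option Int) (size_unit : String), Dom_convert_threshold size_threshold size_unit → Pre_convert_threshold size_threshold size_unit → Spec_convert_threshold size_threshold size_unit (convert_threshold size_threshold size_unit)

-- ===== LEMMAS AND PROOFS =====
theorem cv_fold_shift (k : Nat) (st : Int) :
    (List.foldl (fun acc (_ : Int) => acc * 1024) st ((List.range k).map Int.ofNat))
      = st * 2 ^ (10 * k) := by
  induction k generalizing st with
  | zero => simp
  | succ n ih =>
    rw [List.range_succ, List.map_append, List.foldl_append, ih]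
    rw [show 10 * (n + 1) = 10 * n + 10 from by ring, pow_add]
    simp [List.foldl, mul_assoc]

theorem cv_unit_case (st : Int) (u : String)
    (e : Int) (k : Nat) (hA : cvUnits.get? u = some e)
    (hB : PySem.List.index? ["bytes", "KB", "MB", "GB"] u = some k)
    (hr : PySem.List.pyRange 0 e 1 = (List.range k).map Int.ofNat) :
    Spec_convert_threshold (some st) u (convert_threshold (some st) u) := by
  rw [Spec_convert_threshold, convert_threshold, convert_threshold_alt,
      show cvUnits.getD "bytes" 0 = 0 from by decide, hA, hB]
  simp only [hr, Option.some.injEq]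
  exact cv_fold_shift k st

-- ===== VERDICT (by name: the statement is the Claim_ definition above) =====
theorem convert_threshold_spec : Claim_equal_convert_threshold := by
  intro st u _ hpre
  rcases st with _ | st
  · rfl
  rcases hpre with h | h | h | h | h
  · exact absurd h (by simp)
  all_goals subst h
  · exact cv_unit_case st _ 0 0 (by decide) (by decide) (by decide)
  · exact cv_unit_case st _ 1 1 (by decide) (by decide) (by decide)
  · exact cv_unit_case st _ 2 2 (by decide) (by decide) (by decide)
  · exact cv_unit_case st _ 3 3 (by decide) (by decide) (by decide)
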